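-- pv_equiv track=rewrite | github.com/wwwwanhonghuang/EMBS-BHI-2025-reproduce | adhd/prepare_syntax_analysis_data.py | apply_time_delay
-- ===== SOURCE A (Python) =====
-- from typing import List, Set, Tuple, Optional
--
-- def apply_time_delay(sequence: List[int], delay: int = 2) -> List[int]:
--     """Applies time-delay embedding to a sequence of microstates."""
--     time_delayed = []
--     for i in range(delay - 1, len(sequence)):
--         encoded = 0
--         for j in range(delay):
--             encoded *= 4
--             encoded += int(sequence[i - j] - 1)
--         time_delayed.append(encoded + 1)
--     return time_delayed
-- ===== SOURCE B (Python) =====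
-- def apply_time_delay(sequence, delay=2):
--     """Rolling O(n) re-encoding: drop the window's oldest base-4 digit and add the newest."""
--     n = len(sequence)
--     if delay < 1 or n < delay:
--         return []
--     base = 4 ** (delay - 1)
--     encoded = 0
--     for v in reversed(sequence[:delay]):
--         encoded = encoded * 4 + (v - 1)
--     out = [encoded + 1]
--     for i in range(delay, n):
--         encoded = (encoded - (sequence[i - delay] - 1)) // 4 + (sequence[i] - 1) * base
--         out.append(encoded + 1)
--     return out
-- ===== Notes on version B (the rewrite author's own statement) =====
-- stated objective: faster
-- what changed: A re-encodes every length-delay window from scratch with an inner Horner loop (O(n*delay)); B encodes only the first window and then rolls the code along the sequence in one pass (drop the oldest base-4 digit by an exact division, shift in the newest), O(n).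
-- outside the precondition, e.g. on apply_time_delay([1, 2], 0): A returns [1, 1, 1], B returns []
import Mathlib
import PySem

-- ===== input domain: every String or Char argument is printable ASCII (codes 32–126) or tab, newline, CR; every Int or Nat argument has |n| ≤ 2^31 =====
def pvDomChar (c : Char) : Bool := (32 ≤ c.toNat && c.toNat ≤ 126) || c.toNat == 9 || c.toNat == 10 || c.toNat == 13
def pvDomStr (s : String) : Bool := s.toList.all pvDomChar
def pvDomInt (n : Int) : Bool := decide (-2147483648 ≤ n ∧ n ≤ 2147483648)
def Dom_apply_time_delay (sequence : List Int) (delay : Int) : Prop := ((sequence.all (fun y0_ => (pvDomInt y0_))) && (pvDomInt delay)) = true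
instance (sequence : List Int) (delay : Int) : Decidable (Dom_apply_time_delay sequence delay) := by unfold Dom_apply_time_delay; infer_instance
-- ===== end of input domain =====

-- B replaces A's O(n·delay) re-encoding of every window by an O(n) rolling base-4 update
-- (drop the window's oldest digit, add the newest); equal on delay ≥ 1 (Pre_).

-- ===== PORT A =====
-- sequence[i-j]: whenever the inner loop runs, delay ≥ 1 forces 0 ≤ i-j < len(sequence)
-- (and for delay ≤ 0 the inner loop is empty), so the index is always in range and pyGetD is exact.
def apply_time_delay (sequence : List Int) (delay : Int) : List Int :=
  (PySem.List.pyRange (delay - 1) (sequence.length : Int) 1).foldl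
    (fun time_delayed i =>
      let encoded : Int := (PySem.List.pyRange 0 delay 1).foldl
        (fun encoded j => encoded * 4 + (PySem.List.pyGetD sequence (i - j) 0 - 1)) 0
      time_delayed ++ [encoded + 1]) []

-- ===== PORT B =====
-- indices i and i-delay lie in [0, len) whenever the loop runs (delay ≥ 1 via the guard), so pyGetD is exact.
def apply_time_delay_alt (sequence : List Int) (delay : Int) : List Int :=
  let n : Int := (sequence.length : Int)
  if delay < 1 ∨ n < delay then []
  else
    let base : Int := 4 ^ (delay - 1).toNat
    let encoded0 : Int :=
      ((PySem.List.slice sequence none (some delay)).reverse).foldl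
        (fun e v => e * 4 + (v - 1)) 0
    ((PySem.List.pyRange delay n 1).foldl
      (fun (st : Int × List Int) i =>
        let e : Int := PySem.Int.floordiv (st.1 - (PySem.List.pyGetD sequence (i - delay) 0 - 1)) 4
            + (PySem.List.pyGetD sequence i 0 - 1) * base
        (e, st.2 ++ [e + 1]))
      (encoded0, [encoded0 + 1])).2

-- ===== PRECONDITION & SPEC =====
-- Pre_ restricts to the natural domain of time-delay embedding, delay ≥ 1: for delay ≤ 0 A's inner
-- loop is empty over a range starting at a negative index and A returns a list of all-1 placeholders,
-- which is outside the function's purpose; B returns an empty list there.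
def Pre_apply_time_delay (sequence : List Int) (delay : Int) : Prop := 1 ≤ delay
instance (sequence : List Int) (delay : Int) : Decidable (Pre_apply_time_delay sequence delay) := by unfold Pre_apply_time_delay; infer_instance
def pvWitness_apply_time_delay : List Int × Int := ([1, 2, 3, 4], 2)

def Spec_apply_time_delay (sequence : List Int) (delay : Int) (out : List Int) : Prop := out = apply_time_delay_alt sequence delay
instance (sequence : List Int) (delay : Int) (out : List Int) : Decidable (Spec_apply_time_delay sequence delay out) := by unfold Spec_apply_time_delay; infer_instance

-- ===== CLAIM (what is proved, stated in full; the proofs are below) =====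
def Claim_equal_apply_time_delay : Prop := ∀ (sequence : List Int) (delay : Int), Dom_apply_time_delay sequence delay → Pre_apply_time_delay sequence delay → Spec_apply_time_delay sequence delay (apply_time_delay sequence delay)

-- ===== LEMMAS AND PROOFS =====

-- the Horner encoding both programs use: the first element is the most significant base-4 digit
def pvEnc (l : List Int) : Int := l.foldl (fun e v => e * 4 + (v - 1)) 0
def pvWin (s : List Int) (d : Nat) (i : Int) : List Int :=
  (List.range d).map (fun (j : Nat) => PySem.List.pyGetD s (i - (j : Int)) 0)
theorem pvEnc_foldl_init (l : List Int) (a : Int) :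
    l.foldl (fun e v => e * 4 + (v - 1)) a = a * 4 ^ l.length + pvEnc l := by
  induction l generalizing a with
  | nil => simp [pvEnc]
  | cons x l ih =>
    simp only [List.foldl_cons, List.length_cons, pvEnc]
    rw [ih (a * 4 + (x - 1)), ih (0 * 4 + (x - 1))]
    ring
theorem pvEnc_cons (x : Int) (l : List Int) :
    pvEnc (x :: l) = (x - 1) * 4 ^ l.length + pvEnc l := by
  have := pvEnc_foldl_init l (0 * 4 + (x - 1))
  simpa [pvEnc] using this
theorem pvEnc_append (l : List Int) (y : Int) :
    pvEnc (l ++ [y]) = pvEnc l * 4 + (y - 1) := by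
  simp [pvEnc, List.foldl_append]
theorem pvWin_cons (s : List Int) (m : Nat) (i : Int) :
    pvWin s (m + 1) i
      = PySem.List.pyGetD s i 0
        :: (List.range m).map (fun (j : Nat) => PySem.List.pyGetD s (i - 1 - (j : Int)) 0) := by
  simp [pvWin, List.range_succ_eq_map, List.map_map, Function.comp]
  intro j _
  congr 1
  ring
theorem pvWin_snoc (s : List Int) (m : Nat) (i : Int) :
    pvWin s (m + 1) (i - 1)
      = (List.range m).map (fun (j : Nat) => PySem.List.pyGetD s (i - 1 - (j : Int)) 0)
        ++ [PySem.List.pyGetD s (i - ((m : Int) + 1)) 0] := by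
  simp [pvWin, List.range_succ]
  congr 1
  ring
theorem pvRoll (s : List Int) (m : Nat) (i : Int) :
    pvEnc (pvWin s (m + 1) i)
      = PySem.Int.floordiv
          (pvEnc (pvWin s (m + 1) (i - 1)) - (PySem.List.pyGetD s (i - ((m : Int) + 1)) 0 - 1)) 4
        + (PySem.List.pyGetD s i 0 - 1) * 4 ^ m := by
  rw [pvWin_cons, pvWin_snoc, pvEnc_cons, pvEnc_append]
  have h4 : (0:Int) < 4 := by norm_num
  have : pvEnc ((List.range m).map (fun (j : Nat) => PySem.List.pyGetD s (i - 1 - (j : Int)) 0)) * 4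
      + (PySem.List.pyGetD s (i - ((m : Int) + 1)) 0 - 1)
      - (PySem.List.pyGetD s (i - ((m : Int) + 1)) 0 - 1)
      = pvEnc ((List.range m).map (fun (j : Nat) => PySem.List.pyGetD s (i - 1 - (j : Int)) 0)) * 4 := by ring
  rw [this, PySem.Int.floordiv_eq_ediv_of_pos h4, Int.mul_ediv_cancel _ (by norm_num)]
  simp [List.length_map]
  ring

theorem pvInner_eq (s : List Int) (delay : Int) (hd : 1 ≤ delay) (i : Int) :
    (PySem.List.pyRange 0 delay 1).foldl
        (fun e j => e * 4 + (PySem.List.pyGetD s (i - j) 0 - 1)) 0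
      = pvEnc (pvWin s delay.toNat i) := by
  have h : delay = (delay.toNat : Int) := by omega
  rw [h, PySem.List.pyRange_zero_nat, pvEnc, pvWin, List.foldl_map, List.foldl_map, Int.toNat_natCast]

theorem pvA_eq (s : List Int) (delay : Int) (hd : 1 ≤ delay) :
    apply_time_delay s delay
      = (PySem.List.pyRange (delay - 1) (s.length : Int) 1).map
          (fun i => pvEnc (pvWin s delay.toNat i) + 1) := by
  unfold apply_time_delay
  refine Eq.trans (PySem.List.foldl_append_singleton_eq_map _ _ []) ?_
  rw [List.nil_append]
  refine List.map_congr_left fun i _ => ?_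
  rw [pvInner_eq s delay hd i]

theorem pvInit_eq (s : List Int) (delay : Int) (hd : 1 ≤ delay) (hl : delay ≤ (s.length : Int)) :
    (PySem.List.slice s none (some delay)).reverse = pvWin s delay.toNat (delay - 1) := by
  rw [PySem.List.slice_to _ (by omega : (0:Int) ≤ delay)]
  have hdn : delay.toNat ≤ s.length := by omega
  apply List.ext_getElem
  · simp [pvWin, Nat.min_eq_left hdn]
  · intro k h1 h2
    have hk : k < delay.toNat := by
      simpa [List.length_take, Nat.min_eq_left hdn] using h1
    simp only [pvWin, List.getElem_reverse, List.getElem_map, List.getElem_range,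
      List.getElem_take, List.length_take]
    have harg : delay - 1 - ((k : Nat) : Int) = ((delay.toNat - 1 - k : Nat) : Int) := by omega
    rw [harg, PySem.List.pyGetD_natCast]
    rw [List.getD_eq_getElem _ _ (by omega : delay.toNat - 1 - k < s.length)]
    congr 1
    simp [Nat.min_eq_left hdn]

theorem pvLoopB (s : List Int) (delay : Int) (hd : 1 ≤ delay) :
    ∀ (k : Nat) (m : Int) (st : Int × List Int),
      st.1 = pvEnc (pvWin s delay.toNat (m - 1)) →
      ((PySem.List.pyRange m (m + (k : Int)) 1).foldl
          (fun (st : Int × List Int) i =>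
            let e : Int := PySem.Int.floordiv
                (st.1 - (PySem.List.pyGetD s (i - delay) 0 - 1)) 4
              + (PySem.List.pyGetD s i 0 - 1) * 4 ^ (delay - 1).toNat
            (e, st.2 ++ [e + 1])) st).2
        = st.2 ++ (PySem.List.pyRange m (m + (k : Int)) 1).map
            (fun i => pvEnc (pvWin s delay.toNat i) + 1) := by
  intro k
  induction k with
  | zero =>
    intro m st hst
    simp [PySem.List.pyRange_one_eq_nil (le_refl m)]
  | succ k ih =>
    intro m st hst
    have harg : m + (((k : Nat) + 1 : Nat) : Int) = (m + 1) + (k : Int) := by push_cast; ring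
    have hcons : PySem.List.pyRange m (m + (((k : Nat) + 1 : Nat) : Int)) 1
        = m :: PySem.List.pyRange (m + 1) ((m + 1) + (k : Int)) 1 := by
      rw [harg, PySem.List.pyRange_one_cons (by omega)]
    obtain ⟨d, hdd⟩ : ∃ d : Nat, delay.toNat = d + 1 := ⟨delay.toNat - 1, by omega⟩
    have hstep : PySem.Int.floordiv (st.1 - (PySem.List.pyGetD s (m - delay) 0 - 1)) 4
        + (PySem.List.pyGetD s m 0 - 1) * 4 ^ (delay - 1).toNat
        = pvEnc (pvWin s delay.toNat m) := by
      rw [hst, hdd]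
      have hde : ((d : Int) + 1) = delay := by omega
      have hexp : (delay - 1).toNat = d := by omega
      have := pvRoll s d m
      rw [hde] at this
      rw [hexp, this]
    rw [hcons]
    simp only [List.foldl_cons, List.map_cons]
    rw [hstep]
    rw [ih (m + 1) _ (by norm_num)]
    simp

-- ===== VERDICT (by name: the statement is the Claim_ definition above) =====
theorem apply_time_delay_spec : Claim_equal_apply_time_delay := by
  intro s delay _ hpre
  unfold Pre_apply_time_delay at hpre
  unfold Spec_apply_time_delay
  by_cases hlen : (s.length : Int) < delay
  · unfold apply_time_delay apply_time_delay_alt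
    rw [show PySem.List.pyRange (delay - 1) (s.length : Int) 1 = [] from
      PySem.List.pyRange_one_eq_nil (by omega)]
    simp [hlen]
  · push_neg at hlen
    rw [pvA_eq s delay hpre]
    unfold apply_time_delay_alt
    rw [if_neg (by omega : ¬(delay < 1 ∨ (s.length : Int) < delay))]
    have he : ((PySem.List.slice s none (some delay)).reverse).foldl
        (fun e v => e * 4 + (v - 1)) 0 = pvEnc (pvWin s delay.toNat (delay - 1)) := by
      rw [pvInit_eq s delay hpre hlen]; rfl
    rw [he]
    obtain ⟨t, ht⟩ : ∃ t : Nat, (s.length : Int) = delay + (t : Int) :=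
      ⟨((s.length : Int) - delay).toNat, by omega⟩
    rw [ht]
    have hsplit : PySem.List.pyRange (delay - 1) (delay + (t : Int)) 1
        = [delay - 1] ++ PySem.List.pyRange delay (delay + (t : Int)) 1 := by
      rw [PySem.List.pyRange_one_append (delay - 1) delay (delay + (t : Int)) (by omega) (by omega)]
      congr 1
      simpa using PySem.List.pyRange_one_singleton (delay - 1)
    rw [hsplit, List.map_append]
    rw [pvLoopB s delay hpre t delay
        (pvEnc (pvWin s delay.toNat (delay - 1)), [pvEnc (pvWin s delay.toNat (delay - 1)) + 1])
        rfl]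
    simp
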